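-- pv_equiv track=rewrite | github.com/asspaev/WideResearcher | app/core/research_pipeline.py | _parse_chapters
-- ===== SOURCE A (Python) =====
-- def _parse_chapters(structure: str) -> list[str]:
--     """Splits a Markdown outline into h2-level chapter blocks.
--
--     Each block contains the ## heading line and all following ### lines
--     until the next ## heading. The top-level # heading is ignored.
--
--     Args:
--         structure: Markdown outline string produced by _step_plan_structure.
--
--     Returns:
--         List of chapter block strings (one per ## heading).
--     """
--     lines = structure.splitlines()
--     chapters: list[str] = []
--     current: list[str] = []
--     for line in lines:
--         stripped = line.strip()
--         if stripped.startswith("## "):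
--             if current:
--                 chapters.append("\n".join(current))
--             current = [line]
--         elif stripped.startswith("# "):
--             # top-level title — skip
--             pass
--         elif current:
--             current.append(line)
--     if current:
--         chapters.append("\n".join(current))
--     return chapters
-- ===== SOURCE B (Python) =====
-- def _parse_chapters(structure: str) -> list[str]:
--     """Index-and-slice rewrite: find all h2 heading positions, then cut the
--     line list at those boundaries and join each block (minus '# ' title lines)."""
--     lines = structure.splitlines()
--     idxs = [i for i, line in enumerate(lines) if line.strip().startswith("## ")]
--     bounds = idxs + [len(lines)]
--     return [
--         "\n".join(l for l in lines[start:end] if not l.strip().startswith("# "))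
--         for start, end in zip(idxs, bounds[1:])
--     ]
-- ===== Notes on version B (the rewrite author's own statement) =====
-- stated objective: alternative
-- what changed: Replaces A's single pass with a mutating chapters/current accumulator pair by a two-phase decomposition: first collect the indices of the h2 heading lines, then slice the line list between consecutive boundaries and join each slice after dropping top-level title lines.
import Mathlib
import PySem

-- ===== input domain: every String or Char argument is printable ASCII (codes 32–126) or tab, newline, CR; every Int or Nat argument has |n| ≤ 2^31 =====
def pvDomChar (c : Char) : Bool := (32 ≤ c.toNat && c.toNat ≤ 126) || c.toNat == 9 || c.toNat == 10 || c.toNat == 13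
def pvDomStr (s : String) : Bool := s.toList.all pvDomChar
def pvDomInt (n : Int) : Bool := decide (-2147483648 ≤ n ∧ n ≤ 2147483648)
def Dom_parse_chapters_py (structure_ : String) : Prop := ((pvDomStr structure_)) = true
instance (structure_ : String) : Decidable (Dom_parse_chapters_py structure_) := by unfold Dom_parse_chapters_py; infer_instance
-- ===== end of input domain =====

-- B re-implements the chapter splitter by a different decomposition (heading indices + slices)
-- instead of A's single accumulator loop; objective: alternative/simpler, same cost.

-- shared trivial predicates: "stripped line starts with '## '" / "… with '# '"
def pvIsH2 (l : String) : Bool := PySem.Str.startswith (PySem.Str.strip l) "## "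
def pvIsH1 (l : String) : Bool := PySem.Str.startswith (PySem.Str.strip l) "# "

-- ===== PORT A =====
-- loop body: state = (chapters, current)
def pvStepA (st : List String × List String) (line : String) : List String × List String :=
  if pvIsH2 line then
    ((if st.2 ≠ [] then st.1 ++ [PySem.Str.join "\n" st.2] else st.1), [line])
  else if pvIsH1 line then st
  else if st.2 ≠ [] then (st.1, st.2 ++ [line])
  else st

def parse_chapters_py (structure_ : String) : List String :=
  let lines := PySem.Str.splitlines structure_
  let st := lines.foldl pvStepA ([], [])
  if st.2 ≠ [] then st.1 ++ [PySem.Str.join "\n" st.2] else st.1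

-- ===== PORT B =====
def parse_chapters_py_alt (structure_ : String) : List String :=
  let lines := PySem.Str.splitlines structure_
  let idxs : List Int :=
    ((PySem.List.enumerate lines 0).filter (fun p => pvIsH2 p.2)).map (fun p => p.1)
  let bounds := idxs ++ [(lines.length : Int)]
  (idxs.zip bounds.tail).map (fun p =>
    PySem.Str.join "\n"
      ((PySem.List.slice lines (some p.1) (some p.2)).filter (fun l => !pvIsH1 l)))

-- ===== PRECONDITION & SPEC =====
def Spec_parse_chapters_py (structure_ : String) (out : List String) : Prop := out = parse_chapters_py_alt structure_
instance (structure_ : String) (out : List String) : Decidable (Spec_parse_chapters_py structure_ out) := by unfold Spec_parse_chapters_py; infer_instance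

-- ===== CLAIM (what is proved, stated in full; the proofs are below) =====
def Claim_equal_parse_chapters_py : Prop := ∀ (structure_ : String), Dom_parse_chapters_py structure_ → Spec_parse_chapters_py structure_ (parse_chapters_py structure_)

-- ===== LEMMAS AND PROOFS =====

-- an h2 line cannot also be an h1 line ('## ' and '# ' disagree at the second char)
theorem pvIsH1_of_isH2 (l : String) (h : pvIsH2 l = true) : pvIsH1 l = false := by
  unfold pvIsH2 pvIsH1 at *
  rw [PySem.Str.startswith_eq] at *
  rw [PySem.Chars.startswith_iff] at h
  generalize hcs : (PySem.Str.strip l).toList = cs at *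
  have h2 : "## ".toList = ['#', '#', ' '] := by decide
  rw [h2] at h
  obtain ⟨t, ht⟩ := h
  subst ht
  rw [Bool.eq_false_iff]
  intro hp
  rw [PySem.Chars.startswith_iff] at hp
  have h1 : "# ".toList = ['#', ' '] := by decide
  rw [h1] at hp
  simp [List.cons_prefix_cons] at hp

-- common reference function: recursion on "next h2 heading"
def pvSpec : List String → List String
  | [] => []
  | l :: ls =>
    if pvIsH2 l then
      PySem.Str.join "\n" (l :: (ls.takeWhile (fun x => !pvIsH2 x)).filter (fun x => !pvIsH1 x))
        :: pvSpec (ls.dropWhile (fun x => !pvIsH2 x))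
    else pvSpec ls
termination_by ls => ls.length
decreasing_by
  · exact Nat.lt_succ_of_le (ls.length_dropWhile_le _)
  · simp

theorem pvSpec_nil : pvSpec [] = [] := by rw [pvSpec]

theorem pvSpec_cons (l : String) (ls : List String) :
    pvSpec (l :: ls) =
      if pvIsH2 l then
        PySem.Str.join "\n" (l :: (ls.takeWhile (fun x => !pvIsH2 x)).filter (fun x => !pvIsH1 x))
          :: pvSpec (ls.dropWhile (fun x => !pvIsH2 x))
      else pvSpec ls := by
  rw [pvSpec]

theorem pvSpec_dropWhile (ls : List String) :
    pvSpec (ls.dropWhile (fun x => !pvIsH2 x)) = pvSpec ls := by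
  induction ls with
  | nil => simp
  | cons l ls ih =>
    by_cases h : pvIsH2 l = true
    · simp [h]
    · rw [List.dropWhile_cons]
      simp only [h, Bool.not_false, if_true]
      rw [ih, pvSpec_cons]
      simp [h]

-- ---- A side ----
def pvFinish (st : List String × List String) : List String :=
  if st.2 ≠ [] then st.1 ++ [PySem.Str.join "\n" st.2] else st.1

def pvAux : List String → List String → List String
  | cur, [] => if cur ≠ [] then [PySem.Str.join "\n" cur] else []
  | cur, l :: ls =>
    if pvIsH2 l then (if cur ≠ [] then [PySem.Str.join "\n" cur] else []) ++ pvAux [l] ls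
    else if pvIsH1 l then pvAux cur ls
    else if cur ≠ [] then pvAux (cur ++ [l]) ls
    else pvAux cur ls
termination_by _ ls => ls.length

theorem pvAux_nil_eq (cur : List String) :
    pvAux cur [] = if cur ≠ [] then [PySem.Str.join "\n" cur] else [] := by rw [pvAux]

theorem pvAux_cons_eq (cur : List String) (l : String) (ls : List String) :
    pvAux cur (l :: ls) =
      if pvIsH2 l then (if cur ≠ [] then [PySem.Str.join "\n" cur] else []) ++ pvAux [l] ls
      else if pvIsH1 l then pvAux cur ls
      else if cur ≠ [] then pvAux (cur ++ [l]) ls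
      else pvAux cur ls := by rw [pvAux]

theorem pvFoldA_eq_aux (ls : List String) (ch cur : List String) :
    pvFinish (List.foldl pvStepA (ch, cur) ls) = ch ++ pvAux cur ls := by
  induction ls generalizing ch cur with
  | nil =>
    rw [List.foldl_nil, pvAux_nil_eq, pvFinish]
    by_cases h : cur = [] <;> simp [h]
  | cons l ls ih =>
    rw [List.foldl_cons, pvAux_cons_eq, pvStepA]
    by_cases h2 : pvIsH2 l = true
    · simp only [h2, if_true]
      by_cases hc : cur = [] <;>
        simp only [hc, ne_eq, not_true_eq_false, not_false_eq_true, if_true, if_false,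
          Bool.false_eq_true] <;>
        rw [ih] <;> simp
    · by_cases h1 : pvIsH1 l = true
      · simp only [h2, h1, Bool.false_eq_true, if_false]
        exact ih ch cur
      · by_cases hc : cur = []
        · simp only [h2, h1, hc, Bool.false_eq_true, if_false, ne_eq, not_true_eq_false]
          exact ih ch []
        · simp only [h2, h1, hc, Bool.false_eq_true, if_false, ne_eq, not_false_eq_true, if_true]
          exact ih ch (cur ++ [l])

theorem pvAux_cons (cur : List String) (ls : List String) (h : cur ≠ []) :
    pvAux cur ls =
      PySem.Str.join "\n" (cur ++ (ls.takeWhile (fun x => !pvIsH2 x)).filter (fun x => !pvIsH1 x))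
        :: pvAux [] (ls.dropWhile (fun x => !pvIsH2 x)) := by
  induction ls generalizing cur with
  | nil => simp [pvAux_nil_eq, h]
  | cons l ls ih =>
    rw [pvAux_cons_eq, List.takeWhile_cons, List.dropWhile_cons]
    by_cases h2 : pvIsH2 l = true
    · simp only [h2, if_true, h, ne_eq, not_false_eq_true, Bool.not_true, Bool.false_eq_true,
        if_false]
      rw [pvAux_cons_eq]
      simp [h2]
    · by_cases h1 : pvIsH1 l = true
      · simp only [h2, h1, Bool.false_eq_true, if_false, if_true, Bool.not_false]
        rw [ih cur h, List.filter_cons]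
        simp [h1]
      · simp only [h2, h1, h, Bool.false_eq_true, if_false, ne_eq, not_false_eq_true, if_true,
          Bool.not_false]
        rw [ih (cur ++ [l]) (by simp), List.filter_cons]
        simp [h1]

theorem pvAux_nil_eq_spec_aux (n : Nat) :
    ∀ ls : List String, ls.length ≤ n → pvAux [] ls = pvSpec ls := by
  induction n with
  | zero =>
    intro ls hls
    rw [List.length_eq_zero_iff.mp (Nat.le_zero.mp hls)]
    rw [pvAux_nil_eq, pvSpec_nil]
    simp
  | succ n ih =>
    intro ls hls
    match ls with
    | [] => rw [pvAux_nil_eq, pvSpec_nil]; simp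
    | l :: ls =>
      rw [pvAux_cons_eq, pvSpec_cons]
      by_cases h2 : pvIsH2 l = true
      · simp only [h2, if_true, ne_eq, not_true_eq_false, if_false, List.nil_append]
        rw [pvAux_cons _ _ (by simp)]
        simp only [List.singleton_append]
        congr 1
        exact ih _ (le_trans (ls.length_dropWhile_le _) (Nat.le_of_succ_le_succ hls))
      · by_cases h1 : pvIsH1 l = true
        · simp only [h2, h1, Bool.false_eq_true, if_false, if_true]
          exact ih _ (Nat.le_of_succ_le_succ hls)
        · simp only [h2, h1, Bool.false_eq_true, if_false, ne_eq, not_true_eq_false]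
          exact ih _ (Nat.le_of_succ_le_succ hls)

theorem pvAux_nil_eq_spec (ls : List String) : pvAux [] ls = pvSpec ls :=
  pvAux_nil_eq_spec_aux ls.length ls le_rfl

-- ---- B side ----
def pvIdxs : List String → List Nat
  | [] => []
  | l :: ls => if pvIsH2 l then 0 :: (pvIdxs ls).map (· + 1) else (pvIdxs ls).map (· + 1)

def pvChunk (lines : List String) (i j : Nat) : String :=
  PySem.Str.join "\n" (((lines.drop i).take (j - i)).filter (fun l => !pvIsH1 l))

def pvChunks (lines : List String) (n : Nat) : List Nat → List String
  | [] => []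
  | i :: rest => pvChunk lines i (rest.headD n) :: pvChunks lines n rest

theorem pvHeadD_map_succ (I : List Nat) (n : Nat) :
    (I.map (· + 1)).headD (n + 1) = I.headD n + 1 := by
  cases I <;> simp

theorem pvEnumFilter_eq (ls : List String) (s : Int) :
    (((PySem.List.enumerate ls s).filter (fun p => pvIsH2 p.2)).map (fun p => p.1))
      = (pvIdxs ls).map (fun (i : Nat) => s + (i : Int)) := by
  induction ls generalizing s with
  | nil => simp [PySem.List.enumerate_nil, pvIdxs]
  | cons l ls ih =>
    rw [PySem.List.enumerate_cons, pvIdxs]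
    by_cases h2 : pvIsH2 l = true
    · simp only [h2, if_true, List.filter_cons, List.map_cons]
      rw [ih (s + 1)]
      simp only [List.map_map, Nat.cast_zero, add_zero]
      congr 1
      apply List.map_congr_left
      intro i _
      simp only [Function.comp_apply]
      push_cast
      ring
    · simp only [h2, if_false, List.filter_cons, Bool.false_eq_true]
      rw [ih (s + 1), List.map_map]
      apply List.map_congr_left
      intro i _
      simp only [Function.comp_apply]
      push_cast
      ring

theorem pvZip_eq_chunks (lines : List String) (I : List Nat) (n : Nat) :
    (((I.map (fun (i : Nat) => (i : Int))).zip
        (((I.map (fun (i : Nat) => (i : Int))) ++ [(n : Int)]).tail)).map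
      (fun p => PySem.Str.join "\n"
        ((PySem.List.slice lines (some p.1) (some p.2)).filter (fun l => !pvIsH1 l))))
      = pvChunks lines n I := by
  induction I with
  | nil => simp [pvChunks]
  | cons i I ih =>
    cases I with
    | nil =>
      simp only [List.map_cons, List.map_nil, List.nil_append, List.cons_append, List.tail_cons,
        List.zip_cons_cons, List.zip_nil_right, List.map_nil, pvChunks, List.headD_nil]
      rw [pvChunk, PySem.List.slice_natCast]
    | cons j rest =>
      simp only [List.map_cons, List.cons_append, List.tail_cons, List.zip_cons_cons,
        List.map_cons] at ih ⊢
      rw [ih]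
      simp only [pvChunks, List.headD_cons, pvChunk, PySem.List.slice_natCast]

theorem pvChunks_shift (l : String) (ls : List String) (n : Nat) (I : List Nat) :
    pvChunks (l :: ls) (n + 1) (I.map (· + 1)) = pvChunks ls n I := by
  induction I with
  | nil => simp [pvChunks]
  | cons i I ih =>
    simp only [List.map_cons, pvChunks]
    rw [ih, pvHeadD_map_succ, pvChunk, pvChunk, List.drop_succ_cons, Nat.succ_sub_succ]

-- first h2 position characterizes takeWhile/dropWhile
theorem pvIdxs_head (ls : List String) :
    ls.takeWhile (fun x => !pvIsH2 x) = ls.take ((pvIdxs ls).headD ls.length)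
    ∧ ls.dropWhile (fun x => !pvIsH2 x) = ls.drop ((pvIdxs ls).headD ls.length) := by
  induction ls with
  | nil => simp [pvIdxs]
  | cons l ls ih =>
    by_cases h2 : pvIsH2 l = true
    · rw [pvIdxs]
      simp [h2]
    · rw [pvIdxs]
      simp only [h2, Bool.false_eq_true, if_false]
      have hhead : ((pvIdxs ls).map (· + 1)).headD (l :: ls).length
          = (pvIdxs ls).headD ls.length + 1 := by
        cases pvIdxs ls <;> simp
      rw [hhead, List.takeWhile_cons, List.dropWhile_cons]
      simp only [h2, Bool.not_false, if_true, List.take_succ_cons, List.drop_succ_cons]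
      exact ⟨by rw [ih.1], by rw [ih.2]⟩

theorem pvChunks_eq_spec (ls : List String) :
    pvChunks ls ls.length (pvIdxs ls) = pvSpec ls := by
  induction ls with
  | nil => simp [pvIdxs, pvChunks, pvSpec_nil]
  | cons l ls ih =>
    rw [pvSpec_cons]
    by_cases h2 : pvIsH2 l = true
    · rw [pvIdxs]
      simp only [h2, if_true, List.length_cons, pvChunks]
      rw [pvChunks_shift, ih, pvSpec_dropWhile ls, pvHeadD_map_succ, pvChunk]
      have hl1 : (!pvIsH1 l) = true := by simp [pvIsH1_of_isH2 l h2]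
      obtain ⟨htake, _⟩ := pvIdxs_head ls
      simp only [List.drop_zero, Nat.sub_zero, List.take_succ_cons, List.filter_cons, hl1,
        if_true, htake]
    · rw [pvIdxs]
      simp only [h2, Bool.false_eq_true, if_false, List.length_cons]
      rw [pvChunks_shift, ih]

-- the whole statement, on the split line list
theorem pvMain (lines : List String) :
    pvFinish (List.foldl pvStepA ([], []) lines) =
      (((((PySem.List.enumerate lines 0).filter (fun p => pvIsH2 p.2)).map (fun p => p.1)).zip
        (((((PySem.List.enumerate lines 0).filter (fun p => pvIsH2 p.2)).map (fun p => p.1))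
            ++ [(lines.length : Int)]).tail)).map
        (fun p => PySem.Str.join "\n"
          ((PySem.List.slice lines (some p.1) (some p.2)).filter (fun l => !pvIsH1 l)))) := by
  have hb : (((PySem.List.enumerate lines 0).filter (fun p => pvIsH2 p.2)).map (fun p => p.1))
      = (pvIdxs lines).map (fun (i : Nat) => (i : Int)) := by
    rw [pvEnumFilter_eq lines 0]
    simp
  rw [hb, pvZip_eq_chunks lines (pvIdxs lines) lines.length, pvChunks_eq_spec,
    pvFoldA_eq_aux lines [] [], List.nil_append, pvAux_nil_eq_spec]

-- ===== VERDICT (by name: the statement is the Claim_ definition above) =====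
theorem parse_chapters_py_spec : Claim_equal_parse_chapters_py := by
  intro s _
  exact pvMain (PySem.Str.splitlines s)
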